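-- pv_equiv track=rewrite | github.com/rachelj98/MoleratBones | 5_ECT_predictive_analysis/ECT_computation_scripts/ect/computeECT.py | Euler_Curve
-- ===== SOURCE A (Python) =====
-- import operator
--
-- def Euler_Curve(vertex_height_dict, edge_heights, face_heights):
--     sort = sorted(vertex_height_dict.items(), key=operator.itemgetter(1))
--     V=0
--     E=0
--     F=0
--     levelset=[]
--     EC_old=0
--     EC_dict=dict()
--     for pair in sort:
--         levelset.append(pair[0])
--         E=sum(i<=pair[1] for i in edge_heights)
--         F=sum(i<=pair[1] for i in face_heights)
--         #sub_edges=Set(list(combinations(levelset,2))) &edges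
--         #sub_faces=Set(list(combinations(levelset,3))) &faceSet
--         EC=len(levelset)-E+F#-len(sub_edges)#+len(sub_faces)
--         if (EC != EC_old):
--             EC_dict[pair[1]]=EC
--             EC_old=EC
--     return EC_dict
-- ===== SOURCE B (Python) =====
-- def Euler_Curve(vertex_height_dict, edge_heights, face_heights):
--     # Sort edge/face heights once, then advance merge pointers instead of
--     # recounting edge_heights/face_heights at every vertex.
--     verts = sorted(vertex_height_dict.items(), key=lambda p: p[1])
--     es = sorted(edge_heights)
--     fs = sorted(face_heights)
--     ne, nf = len(es), len(fs)
--     i = j = 0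
--     k = 0
--     ec_prev = 0
--     out = {}
--     for _, h in verts:
--         k += 1
--         while i < ne and es[i] <= h:
--             i += 1
--         while j < nf and fs[j] <= h:
--             j += 1
--         ec = k - i + j
--         if ec != ec_prev:
--             out[h] = ec
--             ec_prev = ec
--     return out
-- ===== Notes on version B (the rewrite author's own statement) =====
-- stated objective: faster
-- what changed: Instead of rescanning edge_heights and face_heights at every vertex, B sorts both lists once and advances two merge pointers over them while walking the height-sorted vertices.
import Mathlib
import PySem

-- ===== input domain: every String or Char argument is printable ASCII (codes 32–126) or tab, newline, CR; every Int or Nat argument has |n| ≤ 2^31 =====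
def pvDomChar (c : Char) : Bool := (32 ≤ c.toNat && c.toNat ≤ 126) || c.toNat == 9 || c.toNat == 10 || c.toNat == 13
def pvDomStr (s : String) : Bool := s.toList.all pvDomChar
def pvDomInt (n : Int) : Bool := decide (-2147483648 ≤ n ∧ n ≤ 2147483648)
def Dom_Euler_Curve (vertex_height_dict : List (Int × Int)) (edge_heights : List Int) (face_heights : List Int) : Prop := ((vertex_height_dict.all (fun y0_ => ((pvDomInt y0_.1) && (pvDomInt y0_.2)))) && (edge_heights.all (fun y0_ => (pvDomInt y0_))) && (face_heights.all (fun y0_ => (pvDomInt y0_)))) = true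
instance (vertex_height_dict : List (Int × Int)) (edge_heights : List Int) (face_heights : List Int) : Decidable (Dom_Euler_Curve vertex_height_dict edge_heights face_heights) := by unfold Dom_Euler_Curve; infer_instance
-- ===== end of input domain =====

-- B sorts the edge/face heights once and advances merge pointers instead of recounting
-- both lists at every vertex (objective: faster).

-- ===== PORT A =====
-- loop body of A's 'for pair in sort': state = (levelset, EC_old, EC_dict)
def eulerStepA (edge_heights face_heights : List Int)
    (st : List Int × Int × PySem.Dict Int Int) (pair : Int × Int) :
    List Int × Int × PySem.Dict Int Int :=
  let levelset := st.1 ++ [pair.1]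
  let E : Int := (edge_heights.map (fun i => if i ≤ pair.2 then (1 : Int) else 0)).sum
  let F : Int := (face_heights.map (fun i => if i ≤ pair.2 then (1 : Int) else 0)).sum
  let EC : Int := PySem.List.len levelset - E + F
  if EC ≠ st.2.1 then (levelset, EC, st.2.2.insert pair.2 EC)
  else (levelset, st.2.1, st.2.2)

def Euler_Curve (vertex_height_dict : List (Int × Int)) (edge_heights : List Int) (face_heights : List Int) : List (Int × Int) :=
  let sort := PySem.List.sorted (PySem.Dict.ofList vertex_height_dict).items (fun p => p.2) false
  (sort.foldl (eulerStepA edge_heights face_heights) ([], 0, PySem.Dict.empty)).2.2.items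

-- ===== PORT B =====
-- B's 'for _, h in verts' loop with the two while-pointers: the advanced pointer i is
-- represented by the remaining suffix remE (i = neTot - remE.length), likewise j/remF.
def eulerLoopB (neTot nfTot : Int) :
    List (Int × Int) → Int → List Int → List Int → Int → PySem.Dict Int Int → PySem.Dict Int Int
  | [], _, _, _, _, acc => acc
  | p :: rest, k, remE, remF, ecPrev, acc =>
    let remE' := remE.dropWhile (fun x => decide (x ≤ p.2))
    let remF' := remF.dropWhile (fun x => decide (x ≤ p.2))
    let ec : Int := (k + 1) - (neTot - (remE'.length : Int)) + (nfTot - (remF'.length : Int))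
    if ec ≠ ecPrev then eulerLoopB neTot nfTot rest (k + 1) remE' remF' ec (acc.insert p.2 ec)
    else eulerLoopB neTot nfTot rest (k + 1) remE' remF' ecPrev acc

def Euler_Curve_alt (vertex_height_dict : List (Int × Int)) (edge_heights : List Int) (face_heights : List Int) : List (Int × Int) :=
  let verts := PySem.List.sorted (PySem.Dict.ofList vertex_height_dict).items (fun p => p.2) false
  let es := PySem.List.sorted edge_heights (fun x => x) false
  let fs := PySem.List.sorted face_heights (fun x => x) false
  (eulerLoopB (PySem.List.len es) (PySem.List.len fs) verts 0 es fs 0 PySem.Dict.empty).items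

-- ===== PRECONDITION & SPEC =====
def Spec_Euler_Curve (vertex_height_dict : List (Int × Int)) (edge_heights : List Int) (face_heights : List Int) (out : List (Int × Int)) : Prop := out = Euler_Curve_alt vertex_height_dict edge_heights face_heights
instance (vertex_height_dict : List (Int × Int)) (edge_heights : List Int) (face_heights : List Int) (out : List (Int × Int)) : Decidable (Spec_Euler_Curve vertex_height_dict edge_heights face_heights out) := by unfold Spec_Euler_Curve; infer_instance

-- ===== CLAIM (what is proved, stated in full; the proofs are below) =====
def Claim_equal_Euler_Curve : Prop := ∀ (vertex_height_dict : List (Int × Int)) (edge_heights : List Int) (face_heights : List Int), Dom_Euler_Curve vertex_height_dict edge_heights face_heights → Spec_Euler_Curve vertex_height_dict edge_heights face_heights (Euler_Curve vertex_height_dict edge_heights face_heights)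

-- ===== LEMMAS AND PROOFS =====

-- a 0/1 sum is a countP
lemma sum_ite_eq_countP (l : List Int) (h : Int) :
    (l.map (fun i => if i ≤ h then (1 : Int) else 0)).sum = (l.countP (fun i => decide (i ≤ h)) : Int) := by
  induction l with
  | nil => simp
  | cons x t ih =>
    by_cases hx : x ≤ h <;> simp [hx, ih, Int.add_comm]

-- on a (≤)-sorted list, the elements ≤ h are exactly the takeWhile prefix
lemma countP_le_of_sorted (l : List Int) (hs : l.Pairwise (· ≤ ·)) (h : Int) :
    l.countP (fun x => decide (x ≤ h)) = (l.takeWhile (fun x => decide (x ≤ h))).length := by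
  induction l with
  | nil => simp
  | cons x t ih =>
    rcases List.pairwise_cons.mp hs with ⟨hx, ht⟩
    by_cases hxh : x ≤ h
    · simp [hxh, ih ht, Nat.add_comm]
    · have h0 : t.countP (fun x => decide (x ≤ h)) = 0 :=
        List.countP_eq_zero.mpr (fun y hy => by
          simp only [decide_eq_true_eq]
          have := hx y hy
          omega)
      simp [hxh, h0]

lemma takeWhile_len_add_dropWhile_len (l : List Int) (p : Int → Bool) :
    (l.takeWhile p).length + (l.dropWhile p).length = l.length := by
  rw [← List.length_append, List.takeWhile_append_dropWhile]

-- dropping already-dropped elements: a weaker predicate first changes nothing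
lemma dropWhile_dropWhile_of_imp (p q : Int → Bool) (himp : ∀ x, q x = true → p x = true) (l : List Int) :
    (l.dropWhile q).dropWhile p = l.dropWhile p := by
  induction l with
  | nil => simp
  | cons x t ih =>
    by_cases hq : q x = true
    · rw [List.dropWhile_cons_of_pos hq, ih, List.dropWhile_cons_of_pos (himp x hq)]
    · rw [List.dropWhile_cons_of_neg (by simp [hq])]

-- the count of elements ≤ h, expressed through B's remaining suffix
lemma countEq (orig es : List Int) (hperm : es.Perm orig) (hs : es.Pairwise (· ≤ ·)) (h : Int) :
    ((orig.map (fun i => if i ≤ h then (1 : Int) else 0)).sum)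
      = (es.length : Int) - ((es.dropWhile (fun x => decide (x ≤ h))).length : Int) := by
  rw [sum_ite_eq_countP, ← hperm.countP_eq, countP_le_of_sorted es hs h]
  have := takeWhile_len_add_dropWhile_len es (fun x => decide (x ≤ h))
  omega

-- main loop invariant: A's fold over the sorted vertex list equals B's pointer loop
lemma loop_eq (eh fh es fs : List Int)
    (hesP : es.Perm eh) (hfsP : fs.Perm fh)
    (hesS : es.Pairwise (· ≤ ·)) (hfsS : fs.Pairwise (· ≤ ·))
    (vs : List (Int × Int)) (hvs : vs.Pairwise (fun a b => a.2 ≤ b.2))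
    (levelset : List Int) (k : Int) (hk : k = (levelset.length : Int))
    (remE remF : List Int)
    (hE : ∀ h ∈ vs.map (·.2), remE.dropWhile (fun x => decide (x ≤ h)) = es.dropWhile (fun x => decide (x ≤ h)))
    (hF : ∀ h ∈ vs.map (·.2), remF.dropWhile (fun x => decide (x ≤ h)) = fs.dropWhile (fun x => decide (x ≤ h)))
    (ecOld : Int) (acc : PySem.Dict Int Int) :
    (vs.foldl (eulerStepA eh fh) (levelset, ecOld, acc)).2.2
      = eulerLoopB (es.length : Int) (fs.length : Int) vs k remE remF ecOld acc := by
  induction vs generalizing levelset k remE remF ecOld acc with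
  | nil => simp [eulerLoopB]
  | cons p rest ih =>
    rcases List.pairwise_cons.mp hvs with ⟨hhead, hrest⟩
    have hEp := hE p.2 (by simp)
    have hFp := hF p.2 (by simp)
    have hECeq :
        PySem.List.len (levelset ++ [p.1])
            - (eh.map (fun i => if i ≤ p.2 then (1 : Int) else 0)).sum
            + (fh.map (fun i => if i ≤ p.2 then (1 : Int) else 0)).sum
          = (k + 1) - ((es.length : Int) - ((remE.dropWhile (fun x => decide (x ≤ p.2))).length : Int))
            + ((fs.length : Int) - ((remF.dropWhile (fun x => decide (x ≤ p.2))).length : Int)) := by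
      rw [countEq eh es hesP hesS p.2, countEq fh fs hfsP hfsS p.2, hEp, hFp,
        PySem.List.len_eq]
      have hlen : (((levelset ++ [p.1]).length : Int)) = k + 1 := by
        subst hk; rw [List.length_append]; push_cast; simp
      rw [hlen]
    rw [List.foldl_cons]
    show ((rest.foldl (eulerStepA eh fh) (eulerStepA eh fh (levelset, ecOld, acc) p)).2.2) = _
    rw [eulerStepA, eulerLoopB]
    simp only []
    rw [hECeq]
    have hE' : ∀ h ∈ rest.map (·.2),
        (remE.dropWhile (fun x => decide (x ≤ p.2))).dropWhile (fun x => decide (x ≤ h))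
          = es.dropWhile (fun x => decide (x ≤ h)) := by
      intro h hh
      rcases List.mem_map.mp hh with ⟨q, hq, rfl⟩
      have hph : p.2 ≤ q.2 := hhead q hq
      rw [dropWhile_dropWhile_of_imp _ _ (by intro x hx; simp only [decide_eq_true_eq] at *; omega)]
      exact hE q.2 (List.mem_map_of_mem (List.mem_cons_of_mem p hq))
    have hF' : ∀ h ∈ rest.map (·.2),
        (remF.dropWhile (fun x => decide (x ≤ p.2))).dropWhile (fun x => decide (x ≤ h))
          = fs.dropWhile (fun x => decide (x ≤ h)) := by
      intro h hh
      rcases List.mem_map.mp hh with ⟨q, hq, rfl⟩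
      have hph : p.2 ≤ q.2 := hhead q hq
      rw [dropWhile_dropWhile_of_imp _ _ (by intro x hx; simp only [decide_eq_true_eq] at *; omega)]
      exact hF q.2 (List.mem_map_of_mem (List.mem_cons_of_mem p hq))
    have hk' : k + 1 = ((levelset ++ [p.1]).length : Int) := by
      subst hk; rw [List.length_append]; push_cast; simp
    split_ifs with hcond
    · exact ih hrest _ _ hk' _ _ hE' hF' _ _
    · exact ih hrest _ _ hk' _ _ hE' hF' _ _

-- ===== VERDICT (by name: the statement is the Claim_ definition above) =====
theorem Euler_Curve_spec : Claim_equal_Euler_Curve := by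
  intro vhd eh fh _
  unfold Spec_Euler_Curve Euler_Curve Euler_Curve_alt
  simp only [PySem.List.len_eq]
  exact congrArg PySem.Dict.items (loop_eq eh fh _ _
    (PySem.List.sorted_perm eh (fun x => x) false) (PySem.List.sorted_perm fh (fun x => x) false)
    (PySem.List.sorted_pairwise eh (fun x => x)) (PySem.List.sorted_pairwise fh (fun x => x))
    _ (PySem.List.sorted_pairwise (PySem.Dict.ofList vhd).items (fun p => p.2))
    [] 0 (by simp) _ _ (fun _ _ => rfl) (fun _ _ => rfl) 0 PySem.Dict.empty)
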